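-- pv_equiv track=rewrite | github.com/pineconedad/Algorithms | Lab 04/task6.py | max_diamonds
-- ===== SOURCE A (Python) =====
-- def dfs_diamfinder(grid, visited, row, col):
--     if row < 0 or row >= len(grid) or col < 0 or col >= len(grid[0]) or grid[row][col] == '#' or visited[row][col]:
--         return 0
--
--     visited[row][col] = True
--     diamonds_collected = 0
--     if grid[row][col] == 'D':
--         diamonds_collected = 1
--
--     diamonds_collected += dfs_diamfinder(grid, visited, row + 1, col)
--     diamonds_collected += dfs_diamfinder(grid, visited, row - 1, col)
--     diamonds_collected += dfs_diamfinder(grid, visited, row, col + 1)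
--     diamonds_collected += dfs_diamfinder(grid, visited, row, col - 1)
--
--     return diamonds_collected
--
-- def max_diamonds(grid, row, col):
--     rows, cols = row, col
--     visited = [[False] * cols for _ in range(rows)]
--
--     max_diamonds_collected = 0
--
--     for i in range(rows):
--         for j in range(cols):
--             if grid[i][j] != '#':
--                 max_diamonds_collected = max(max_diamonds_collected, dfs_diamfinder(grid, visited, i, j))
--
--     return max_diamonds_collected
-- ===== SOURCE B (Python) =====
-- def flood_fill_count(grid, visited, r, c):
--     count = 0
--     stack = [(r, c)]
--     while stack:
--         rr, cc = stack.pop()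
--         if rr < 0 or rr >= len(grid) or cc < 0 or cc >= len(grid[0]) or grid[rr][cc] == '#' or visited[rr][cc]:
--             continue
--         visited[rr][cc] = True
--         if grid[rr][cc] == 'D':
--             count += 1
--         stack.append((rr, cc - 1))
--         stack.append((rr, cc + 1))
--         stack.append((rr - 1, cc))
--         stack.append((rr + 1, cc))
--     return count
--
-- def max_diamonds(grid, row, col):
--     rows, cols = row, col
--     visited = [[False] * cols for _ in range(rows)]
--
--     best = 0
--     for i in range(rows):
--         for j in range(cols):
--             if grid[i][j] != '#':
--                 best = max(best, flood_fill_count(grid, visited, i, j))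
--     return best
-- ===== Notes on version B (the rewrite author's own statement) =====
-- stated objective: alternative
-- what changed: The recursive four-way DFS is replaced by an iterative flood fill with an explicit stack (mark on pop, push the four neighbours unconditionally), which cannot hit Python's recursion limit; the outer scan and shared visited matrix stay.
-- outside the precondition, e.g. on max_diamonds([['D', '#']], 1, 1): A returns 1, B returns 1
import Mathlib
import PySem

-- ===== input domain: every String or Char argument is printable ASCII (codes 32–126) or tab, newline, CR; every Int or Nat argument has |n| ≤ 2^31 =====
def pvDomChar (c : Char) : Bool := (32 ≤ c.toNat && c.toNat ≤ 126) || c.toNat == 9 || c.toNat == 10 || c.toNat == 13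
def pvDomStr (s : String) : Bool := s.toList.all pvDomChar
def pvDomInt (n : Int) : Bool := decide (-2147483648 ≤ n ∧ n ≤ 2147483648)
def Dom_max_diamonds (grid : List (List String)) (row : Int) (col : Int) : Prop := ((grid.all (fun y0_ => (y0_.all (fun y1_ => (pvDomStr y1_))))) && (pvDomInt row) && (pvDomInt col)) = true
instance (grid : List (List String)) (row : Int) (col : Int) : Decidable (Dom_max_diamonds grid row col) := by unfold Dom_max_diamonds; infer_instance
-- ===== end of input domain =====

-- B replaces the recursive four-way DFS by an iterative flood fill with an explicit stack
-- (mark on pop, push the four neighbours unconditionally); outer scan and shared visited matrix unchanged.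
-- Both Pythons mutate only their own local `visited`; no argument is mutated.

-- shared access helpers (both Pythons index grid/visited the same way; in-range under the guard)
def gridAt (g : List (List String)) (r c : Int) : String :=
  (PySem.List.pyGet? ((PySem.List.pyGet? g r).getD []) c).getD ""

-- visited read; out-of-range reads (unreachable inside Pre_) default to `true`
def visAt (v : List (List Bool)) (r c : Int) : Bool :=
  (PySem.List.pyGet? ((PySem.List.pyGet? v r).getD []) c).getD true

-- visited[r][c] = True (exact for the in-range nonnegative indices at which it is used)
def visSet (v : List (List Bool)) (r c : Int) : List (List Bool) :=
  v.set r.toNat ((v.getD r.toNat []).set c.toNat true)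

-- the common guard of dfs_diamfinder (A) and the flood-fill pop (B), short-circuit order preserved
def blocked (g : List (List String)) (v : List (List Bool)) (r c : Int) : Bool :=
  decide (r < 0) || decide ((g.length : Int) ≤ r) || decide (c < 0) ||
  decide (((g.headD []).length : Int) ≤ c) || decide (gridAt g r c = "#") || visAt v r c

-- number of unvisited cells: termination measure for the flood-fill loop
def unvis (v : List (List Bool)) : Nat := (v.map (fun row => row.countP (fun b => !b))).sum

-- lemmas the ports need for termination/fuel (cited by the definitions below)
lemma countP_set_true_lt : ∀ (row : List Bool) (m : Nat), row[m]? = some false →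
    (row.set m true).countP (fun b => !b) < row.countP (fun b => !b) := by
  intro row
  induction row with
  | nil => intro m h; simp at h
  | cons b t ih =>
    intro m h
    cases m with
    | zero =>
      simp at h
      subst h
      simp
    | succ m =>
      simp only [List.getElem?_cons_succ] at h
      simp only [List.set_cons_succ, List.countP_cons]
      have := ih m h
      omega

lemma unvis_set_lt : ∀ (v : List (List Bool)) (n m : Nat) (row : List Bool),
    v[n]? = some row → row[m]? = some false →
    unvis (v.set n (row.set m true)) < unvis v := by
  intro v
  induction v with
  | nil => intro n m row h1 _; simp at h1
  | cons h0 t ih =>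
    intro n m row h1 h2
    cases n with
    | zero =>
      simp only [List.getElem?_cons_zero, Option.some.injEq] at h1
      subst h1
      simp only [List.set_cons_zero, unvis, List.map_cons, List.sum_cons]
      have := countP_set_true_lt h0 m h2
      omega
    | succ n =>
      simp only [List.getElem?_cons_succ] at h1
      simp only [List.set_cons_succ, unvis, List.map_cons, List.sum_cons]
      have := ih n m row h1 h2
      simp only [unvis] at this
      omega

lemma visAt_false_elim (v : List (List Bool)) (r c : Int) (hr : 0 ≤ r) (hc : 0 ≤ c)
    (h : visAt v r c = false) :
    ∃ row, v[r.toNat]? = some row ∧ row[c.toNat]? = some false := by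
  unfold visAt at h
  rw [show r = ((r.toNat : Nat) : Int) from (Int.toNat_of_nonneg hr).symm,
      show c = ((c.toNat : Nat) : Int) from (Int.toNat_of_nonneg hc).symm] at h
  simp only [PySem.List.pyGet?_natCast] at h
  cases hv : v[r.toNat]? with
  | none => rw [hv] at h; simp at h
  | some row =>
    rw [hv] at h
    simp only [Option.getD_some] at h
    cases hw : row[c.toNat]? with
    | none => rw [hw] at h; simp at h
    | some b =>
      rw [hw] at h
      simp only [Option.getD_some] at h
      exact ⟨row, rfl, by rw [hw, h]⟩

lemma unvis_visSet_lt (v : List (List Bool)) (r c : Int) (hr : 0 ≤ r) (hc : 0 ≤ c)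
    (h : visAt v r c = false) : unvis (visSet v r c) < unvis v := by
  obtain ⟨row, h1, h2⟩ := visAt_false_elim v r c hr hc h
  have hg : v.getD r.toNat [] = row := by rw [List.getD_eq_getElem?_getD, h1]; rfl
  unfold visSet
  rw [hg]
  exact unvis_set_lt v _ _ row h1 h2

lemma blocked_false_unvis_lt (g : List (List String)) (v : List (List Bool)) (r c : Int)
    (h : ¬ blocked g v r c = true) : unvis (visSet v r c) < unvis v := by
  rw [blocked] at h
  simp only [Bool.or_eq_true, decide_eq_true_eq, not_or] at h
  exact unvis_visSet_lt v r c (not_lt.mp h.1.1.1.1.1) (not_lt.mp h.1.1.1.2)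
    (by simpa using h.2)

-- ===== PORT A =====
-- dfs_diamfinder; the fuel argument only makes the recursion total: with the fuel
-- max_diamonds supplies, the 0-fuel branch is never the deciding one inside Pre_.
def dfsA (grid : List (List String)) (fuel : Nat) (visited : List (List Bool)) (r c : Int) :
    Int × List (List Bool) :=
  match fuel with
  | 0 => (0, visited)
  | fuel + 1 =>
    if blocked grid visited r c then (0, visited)
    else
      let v1 := visSet visited r c
      let d0 : Int := if gridAt grid r c = "D" then 1 else 0
      let p1 := dfsA grid fuel v1 (r+1) c
      let p2 := dfsA grid fuel p1.2 (r-1) c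
      let p3 := dfsA grid fuel p2.2 r (c+1)
      let p4 := dfsA grid fuel p3.2 r (c-1)
      (d0 + p1.1 + p2.1 + p3.1 + p4.1, p4.2)

-- body of A's inner loop over j
def stepA (grid : List (List String)) (fuel : Nat) (i : Int)
    (st : Int × List (List Bool)) (j : Int) : Int × List (List Bool) :=
  if gridAt grid i j ≠ "#" then
    let p := dfsA grid fuel st.2 i j
    (max st.1 p.1, p.2)
  else st

-- body of A's outer loop over i
def rowA (grid : List (List String)) (fuel : Nat) (col : Int)
    (st : Int × List (List Bool)) (i : Int) : Int × List (List Bool) :=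
  (PySem.List.pyRange 0 col 1).foldl (stepA grid fuel i) st

def max_diamonds (grid : List (List String)) (row : Int) (col : Int) : Int :=
  ((PySem.List.pyRange 0 row 1).foldl (rowA grid (row.toNat * col.toNat + 1) col)
      (0, List.replicate row.toNat (List.replicate col.toNat false))).1

-- ===== PORT B =====
-- flood_fill_count's while-loop; stack head = top of Python's list
def floodB (grid : List (List String)) (visited : List (List Bool))
    (stack : List (Int × Int)) (count : Int) : Int × List (List Bool) :=
  match stack with
  | [] => (count, visited)
  | (r, c) :: rest =>
    if h : blocked grid visited r c then floodB grid visited rest count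
    else
      floodB grid (visSet visited r c)
        ((r+1,c) :: (r-1,c) :: (r,c+1) :: (r,c-1) :: rest)
        (count + (if gridAt grid r c = "D" then 1 else 0))
termination_by (unvis visited, stack.length)
decreasing_by
  · exact Prod.Lex.right _ (by simp)
  · exact Prod.Lex.left _ _ (blocked_false_unvis_lt grid visited r c h)

-- body of B's inner loop over j
def stepB (grid : List (List String)) (i : Int)
    (st : Int × List (List Bool)) (j : Int) : Int × List (List Bool) :=
  if gridAt grid i j ≠ "#" then
    let p := floodB grid st.2 [(i, j)] 0
    (max st.1 p.1, p.2)
  else st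

-- body of B's outer loop over i
def rowB (grid : List (List String)) (col : Int)
    (st : Int × List (List Bool)) (i : Int) : Int × List (List Bool) :=
  (PySem.List.pyRange 0 col 1).foldl (stepB grid i) st

def max_diamonds_alt (grid : List (List String)) (row : Int) (col : Int) : Int :=
  ((PySem.List.pyRange 0 row 1).foldl (rowB grid col)
      (0, List.replicate row.toNat (List.replicate col.toNat false))).1

-- ===== PRECONDITION & SPEC =====
-- Pre_ admits the trivial cases row ≤ 0 / col ≤ 0 (the loops run zero times) and otherwise
-- requires the declared row/col to equal grid's actual dimensions: on mismatched grids
-- Python A generally raises IndexError (it returns only when walls happen to confine the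
-- search to the declared region).
def Pre_max_diamonds (grid : List (List String)) (row : Int) (col : Int) : Prop :=
  (row ≤ 0 ∨ col ≤ 0) ∨ ((grid.length : Int) = row ∧ ∀ l ∈ grid, (l.length : Int) = col)
instance (grid : List (List String)) (row : Int) (col : Int) : Decidable (Pre_max_diamonds grid row col) := by unfold Pre_max_diamonds; infer_instance

def pvWitness_max_diamonds : List (List String) × Int × Int := ([["D", "."], [".", "#"]], 2, 2)

def Spec_max_diamonds (grid : List (List String)) (row : Int) (col : Int) (out : Int) : Prop := out = max_diamonds_alt grid row col
instance (grid : List (List String)) (row : Int) (col : Int) (out : Int) : Decidable (Spec_max_diamonds grid row col out) := by unfold Spec_max_diamonds; infer_instance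

-- ===== CLAIM (what is proved, stated in full; the proofs are below) =====
def Claim_equal_max_diamonds : Prop := ∀ (grid : List (List String)) (row : Int) (col : Int), Dom_max_diamonds grid row col → Pre_max_diamonds grid row col → Spec_max_diamonds grid row col (max_diamonds grid row col)

-- ===== LEMMAS AND PROOFS =====

-- the DFS never unmarks a cell
lemma dfsA_mono : ∀ (fuel : Nat) (grid : List (List String)) (v : List (List Bool)) (r c : Int),
    unvis (dfsA grid fuel v r c).2 ≤ unvis v := by
  intro fuel
  induction fuel with
  | zero => intro grid v r c; simp [dfsA]
  | succ f ih =>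
    intro grid v r c
    rw [dfsA]
    split
    · exact le_refl _
    · next h =>
      dsimp only
      calc unvis (dfsA grid f (dfsA grid f (dfsA grid f (dfsA grid f (visSet v r c) (r+1) c).2 (r-1) c).2 r (c+1)).2 r (c-1)).2
            ≤ unvis (dfsA grid f (dfsA grid f (dfsA grid f (visSet v r c) (r+1) c).2 (r-1) c).2 r (c+1)).2 := ih _ _ _ _
        _ ≤ unvis (dfsA grid f (dfsA grid f (visSet v r c) (r+1) c).2 (r-1) c).2 := ih _ _ _ _
        _ ≤ unvis (dfsA grid f (visSet v r c) (r+1) c).2 := ih _ _ _ _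
        _ ≤ unvis (visSet v r c) := ih _ _ _ _
        _ ≤ unvis v := le_of_lt (blocked_false_unvis_lt grid v r c (by simp [h]))

-- stack simulation: popping (r,c) processes exactly the recursive dfs from (r,c)
lemma floodB_sim : ∀ (fuel : Nat) (grid : List (List String)) (v : List (List Bool))
    (r c : Int) (stack : List (Int × Int)) (cnt : Int), unvis v < fuel →
    floodB grid v ((r, c) :: stack) cnt =
      floodB grid (dfsA grid fuel v r c).2 stack (cnt + (dfsA grid fuel v r c).1) := by
  intro fuel
  induction fuel with
  | zero => intro grid v r c stack cnt h; exact absurd h (Nat.not_lt_zero _)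
  | succ f ih =>
    intro grid v r c stack cnt h
    by_cases hb : blocked grid v r c = true
    · rw [floodB, dfsA]
      simp [hb]
    · rw [floodB, dfsA]
      rw [dif_neg hb, if_neg hb]
      dsimp only
      have hv1 : unvis (visSet v r c) < unvis v := blocked_false_unvis_lt grid v r c hb
      have h1 : unvis (visSet v r c) < f := by omega
      rw [ih grid (visSet v r c) (r+1) c _ _ h1]
      have h2 : unvis (dfsA grid f (visSet v r c) (r+1) c).2 < f :=
        lt_of_le_of_lt (dfsA_mono f grid (visSet v r c) (r+1) c) h1
      rw [ih grid _ (r-1) c _ _ h2]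
      have h3 : unvis (dfsA grid f (dfsA grid f (visSet v r c) (r+1) c).2 (r-1) c).2 < f :=
        lt_of_le_of_lt (dfsA_mono f grid _ (r-1) c) h2
      rw [ih grid _ r (c+1) _ _ h3]
      have h4 : unvis (dfsA grid f (dfsA grid f (dfsA grid f (visSet v r c) (r+1) c).2 (r-1) c).2 r (c+1)).2 < f :=
        lt_of_le_of_lt (dfsA_mono f grid _ r (c+1)) h3
      rw [ih grid _ r (c-1) _ _ h4]
      congr 1
      ring

-- seeding the stack with one cell computes exactly the dfs from that cell
lemma floodB_single (fuel : Nat) (grid : List (List String)) (v : List (List Bool))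
    (r c : Int) (h : unvis v < fuel) :
    floodB grid v [(r, c)] 0 = dfsA grid fuel v r c := by
  rw [floodB_sim fuel grid v r c [] 0 h, floodB]
  simp

lemma stepA_eq_stepB (grid : List (List String)) (fuel : Nat) (i j : Int)
    (st : Int × List (List Bool)) (h : unvis st.2 < fuel) :
    stepA grid fuel i st j = stepB grid i st j := by
  unfold stepA stepB
  split
  · rw [floodB_single fuel grid st.2 i j h]
  · rfl

lemma stepA_mono (grid : List (List String)) (fuel : Nat) (i j : Int)
    (st : Int × List (List Bool)) : unvis (stepA grid fuel i st j).2 ≤ unvis st.2 := by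
  unfold stepA
  split
  · exact dfsA_mono fuel grid st.2 i j
  · exact le_refl _

lemma foldl_step_eq (grid : List (List String)) (fuel : Nat) (i : Int) :
    ∀ (l : List Int) (st : Int × List (List Bool)), unvis st.2 < fuel →
    l.foldl (stepA grid fuel i) st = l.foldl (stepB grid i) st ∧
      unvis (l.foldl (stepA grid fuel i) st).2 ≤ unvis st.2 := by
  intro l
  induction l with
  | nil => intro st _; exact ⟨rfl, le_refl _⟩
  | cons j t ih =>
    intro st h
    have hm := stepA_mono grid fuel i j st
    obtain ⟨he, hle⟩ := ih (stepA grid fuel i st j) (by omega)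
    constructor
    · simp only [List.foldl_cons]
      rw [he, stepA_eq_stepB grid fuel i j st h]
    · simp only [List.foldl_cons]
      exact le_trans hle hm

lemma rowA_eq_rowB (grid : List (List String)) (fuel : Nat) (col i : Int)
    (st : Int × List (List Bool)) (h : unvis st.2 < fuel) :
    rowA grid fuel col st i = rowB grid col st i ∧
      unvis (rowA grid fuel col st i).2 ≤ unvis st.2 :=
  foldl_step_eq grid fuel i (PySem.List.pyRange 0 col 1) st h

lemma foldl_row_eq (grid : List (List String)) (fuel : Nat) (col : Int) :
    ∀ (l : List Int) (st : Int × List (List Bool)), unvis st.2 < fuel →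
    l.foldl (rowA grid fuel col) st = l.foldl (rowB grid col) st := by
  intro l
  induction l with
  | nil => intro st _; rfl
  | cons i t ih =>
    intro st h
    obtain ⟨he, hle⟩ := rowA_eq_rowB grid fuel col i st h
    simp only [List.foldl_cons]
    rw [ih (rowA grid fuel col st i) (by omega), he]

lemma unvis_replicate (n m : Nat) :
    unvis (List.replicate n (List.replicate m false)) = n * m := by
  simp [unvis, List.countP_eq_length_filter, smul_eq_mul]

-- ===== VERDICT (by name: the statement is the Claim_ definition above) =====
theorem max_diamonds_spec : Claim_equal_max_diamonds := by
  intro grid row col _ _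
  unfold Spec_max_diamonds max_diamonds max_diamonds_alt
  rw [foldl_row_eq grid (row.toNat * col.toNat + 1) col (PySem.List.pyRange 0 row 1)
      (0, List.replicate row.toNat (List.replicate col.toNat false))
      (by simp [unvis_replicate])]
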